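-- pv_equiv track=rewrite | github.com/mugattarova/AdventofCode2024 | d12/d12-1.py | find_perimeter
-- ===== SOURCE A (Python) =====
-- def find_perimeter(shape: list):
--   edge_list = []
--   edge_count = 0
--   for x, y in shape:
--     edges = [(x, y, x, y+1), (x, y+1, x+1, y+1), (x+1, y, x+1, y+1), (x, y, x+1, y)]
--     for e in edges:
--       if e not in edge_list:
--         edge_list.append(e)
--         edge_count += 1
--       else:
--         edge_list.remove(e)
--         edge_count -= 1
--
--   return edge_count*len(shape)
-- ===== SOURCE B (Python) =====
-- def find_perimeter(shape: list):
--   counts = {}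
--   for x, y in shape:
--     for e in ((x, y, x, y+1), (x, y+1, x+1, y+1), (x+1, y, x+1, y+1), (x, y, x+1, y)):
--       counts[e] = counts.get(e, 0) + 1
--   odd = 0
--   for c in counts.values():
--     if c % 2 == 1:
--       odd += 1
--   return odd * len(shape)
-- ===== Notes on version B (the rewrite author's own statement) =====
-- stated objective: faster
-- what changed: Replaces A's toggle-membership list (linear 'in'/'remove' scans per edge) with a single dict of edge multiplicities built in one pass, then counts edges occurring an odd number of times.
import Mathlib
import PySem

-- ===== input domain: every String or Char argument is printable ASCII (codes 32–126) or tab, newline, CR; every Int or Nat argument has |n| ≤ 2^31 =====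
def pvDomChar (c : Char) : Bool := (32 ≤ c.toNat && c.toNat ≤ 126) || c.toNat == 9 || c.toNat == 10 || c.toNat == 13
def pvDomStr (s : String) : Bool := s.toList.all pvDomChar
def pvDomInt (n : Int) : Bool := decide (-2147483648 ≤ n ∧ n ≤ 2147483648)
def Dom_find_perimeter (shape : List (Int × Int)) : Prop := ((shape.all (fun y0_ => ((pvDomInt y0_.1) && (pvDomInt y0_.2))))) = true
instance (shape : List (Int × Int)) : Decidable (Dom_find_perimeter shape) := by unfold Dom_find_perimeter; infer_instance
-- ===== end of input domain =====

-- B replaces A's toggle-membership list (linear `in`/`remove` scans per edge) with one dict of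
-- edge multiplicities, counting the edges that occur an odd number of times (objective: faster).

-- the four unit-square edges of a cell (shared by both ports: both Pythons build the same tuples)
def pvEdges (c : Int × Int) : List (Int × Int × Int × Int) :=
  [(c.1, c.2, c.1, c.2 + 1), (c.1, c.2 + 1, c.1 + 1, c.2 + 1),
   (c.1 + 1, c.2, c.1 + 1, c.2 + 1), (c.1, c.2, c.1 + 1, c.2)]

-- ===== PORT A =====
-- one iteration of A's inner loop: membership test on the list, append or remove-first
def pvStepA (st : List (Int × Int × Int × Int) × Int) (e : Int × Int × Int × Int) :
    List (Int × Int × Int × Int) × Int :=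
  if e ∉ st.1 then (st.1 ++ [e], st.2 + 1) else (st.1.erase e, st.2 - 1)

def find_perimeter (shape : List (Int × Int)) : Int :=
  let r := shape.foldl (fun st c => (pvEdges c).foldl pvStepA st) ([], 0)
  r.2 * shape.length

-- ===== PORT B =====
def find_perimeter_alt (shape : List (Int × Int)) : Int :=
  let counts := shape.foldl
    (fun d c => (pvEdges c).foldl (fun d e => d.insert e (d.getD e 0 + 1)) d)
    PySem.Dict.empty
  let odd := counts.values.foldl (fun acc c => if PySem.Int.mod c 2 == 1 then acc + 1 else acc) 0
  odd * shape.length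

-- ===== PRECONDITION & SPEC =====
def Spec_find_perimeter (shape : List (Int × Int)) (out : Int) : Prop := out = find_perimeter_alt shape
instance (shape : List (Int × Int)) (out : Int) : Decidable (Spec_find_perimeter shape out) := by unfold Spec_find_perimeter; infer_instance

-- ===== CLAIM (what is proved, stated in full; the proofs are below) =====
def Claim_equal_find_perimeter : Prop := ∀ (shape : List (Int × Int)), Dom_find_perimeter shape → Spec_find_perimeter shape (find_perimeter shape)

-- ===== LEMMAS AND PROOFS =====

-- A's list component, in isolation
def pvToggle (l : List (Int × Int × Int × Int)) (e : Int × Int × Int × Int) :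
    List (Int × Int × Int × Int) :=
  if e ∉ l then l ++ [e] else l.erase e

lemma pvStepA_fst (st : List (Int × Int × Int × Int) × Int) (e : Int × Int × Int × Int) :
    (pvStepA st e).1 = pvToggle st.1 e := by
  simp only [pvStepA, pvToggle]; split <;> rfl

lemma pvFoldA_fst (es : List (Int × Int × Int × Int)) (st : List (Int × Int × Int × Int) × Int) :
    (es.foldl pvStepA st).1 = es.foldl pvToggle st.1 := by
  induction es generalizing st with
  | nil => rfl
  | cons e es ih => simp [List.foldl_cons, ih, pvStepA_fst]

-- A's counter always equals the length of its list
lemma pvFoldA_snd (es : List (Int × Int × Int × Int)) (st : List (Int × Int × Int × Int) × Int)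
    (h : st.2 = (st.1.length : Int)) :
    (es.foldl pvStepA st).2 = ((es.foldl pvStepA st).1.length : Int) := by
  induction es generalizing st with
  | nil => exact h
  | cons e es ih =>
    simp only [List.foldl_cons]
    refine ih _ ?_
    by_cases hm : e ∈ st.1
    · have hb : pvStepA st e = (st.1.erase e, st.2 - 1) := by simp [pvStepA, hm]
      rw [hb]
      have hlen : (st.1.erase e).length = st.1.length - 1 := List.length_erase_of_mem hm
      have hpos : 0 < st.1.length := List.length_pos_of_mem hm
      simp only [hlen, h]
      omega
    · have hb : pvStepA st e = (st.1 ++ [e], st.2 + 1) := by simp [pvStepA, hm]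
      rw [hb]
      simp [h]

-- the toggle fold keeps the list duplicate-free, and membership is odd multiplicity so far
lemma pvToggle_invariant (es : List (Int × Int × Int × Int)) :
    (es.foldl pvToggle []).Nodup ∧
    ∀ x, x ∈ es.foldl pvToggle [] ↔ es.count x % 2 = 1 := by
  induction es using List.reverseRecOn with
  | nil => simp
  | append_singleton es e ih =>
    obtain ⟨hnd, hmem⟩ := ih
    rw [List.foldl_append]
    simp only [List.foldl_cons, List.foldl_nil]
    by_cases h : e ∈ es.foldl pvToggle []
    · have hb : pvToggle (es.foldl pvToggle []) e = (es.foldl pvToggle []).erase e := by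
        simp [pvToggle, h]
      rw [hb]
      refine ⟨hnd.erase e, ?_⟩
      intro x
      have hcount : (es ++ [e]).count x = es.count x + (if x = e then 1 else 0) := by
        by_cases hx : x = e
        · subst hx; simp
        · rw [List.count_append, if_neg hx,
            List.count_eq_zero.mpr (show x ∉ [e] by simp [hx]), Nat.add_zero]
      rw [hnd.mem_erase_iff]
      by_cases hx : x = e
      · subst hx
        have : es.count x % 2 = 1 := (hmem x).mp h
        simp [hcount]
        omega
      · simp [hx, hmem x, hcount]
    · have hb : pvToggle (es.foldl pvToggle []) e = es.foldl pvToggle [] ++ [e] := by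
        simp [pvToggle, h]
      rw [hb]
      refine ⟨hnd.append (List.nodup_singleton e) (by simpa using h), ?_⟩
      intro x
      have hcount : (es ++ [e]).count x = es.count x + (if x = e then 1 else 0) := by
        by_cases hx : x = e
        · subst hx; simp
        · rw [List.count_append, if_neg hx,
            List.count_eq_zero.mpr (show x ∉ [e] by simp [hx]), Nat.add_zero]
      by_cases hx : x = e
      · subst hx
        have : ¬ es.count x % 2 = 1 := by
          intro hc; exact h ((hmem x).mpr hc)
        simp [List.mem_append, hcount]
        omega
      · simp [List.mem_append, hx, hmem x, hcount]

-- two duplicate-free lists with the same members have the same length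
lemma pvLength_eq_of_mem_iff {α : Type} [DecidableEq α] (l₁ l₂ : List α)
    (h₁ : l₁.Nodup) (h₂ : l₂.Nodup) (h : ∀ x, x ∈ l₁ ↔ x ∈ l₂) : l₁.length = l₂.length := by
  rw [← List.toFinset_card_of_nodup h₁, ← List.toFinset_card_of_nodup h₂]
  congr 1
  ext x
  simp [h x]

-- ===== VERDICT (by name: the statement is the Claim_ definition above) =====
theorem find_perimeter_spec : Claim_equal_find_perimeter := by
  intro shape _
  show find_perimeter shape = find_perimeter_alt shape
  unfold find_perimeter find_perimeter_alt
  show (List.foldl (fun st c => List.foldl pvStepA st (pvEdges c)) ([], 0) shape).2 * (shape.length : Int) =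
      List.foldl (fun acc c => if PySem.Int.mod c 2 == 1 then acc + 1 else acc) 0
        (List.foldl (fun d c => List.foldl (fun d e => d.insert e (d.getD e 0 + 1)) d (pvEdges c))
          PySem.Dict.empty shape).values * (shape.length : Int)
  -- flatten both nested loops to a single fold over the edge stream
  rw [← List.foldl_flatMap, ← List.foldl_flatMap]
  generalize shape.flatMap pvEdges = es
  -- B's dict is Counter(es)
  rw [PySem.Dict.foldl_insert_getD_add_one_eq_counter]
  -- A's counter is the length of its toggle list
  have hsnd := pvFoldA_snd es ([], 0) rfl
  rw [hsnd, pvFoldA_fst]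
  obtain ⟨hnd, hmem⟩ := pvToggle_invariant es
  -- B's value loop counts the odd-multiplicity distinct edges
  have hvals : (PySem.Dict.counter es).values =
      (PySem.Set.ofList es).map (fun k => ((es.count k : Int))) := by
    show ((PySem.Dict.counter es).items.map (·.2)) = _
    rw [PySem.Dict.items_counter]
    simp
  rw [hvals, PySem.List.foldl_count_if, List.countP_map]
  have hodd : ∀ c : Int, 0 < c → (PySem.Int.mod c 2 == 1) = (c % 2 == 1) := by
    intro c _; rw [PySem.Int.mod_eq_emod_of_pos (by omega)]
  -- the predicate, rephrased on Nat counts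
  have hcntP : List.countP ((fun c => PySem.Int.mod c 2 == 1) ∘ fun k => ((es.count k : Int)))
      (PySem.Set.ofList es) =
      List.countP (fun k => decide (es.count k % 2 = 1)) (PySem.Set.ofList es) := by
    apply List.countP_congr
    intro k hk
    have hkes : k ∈ es := (PySem.Set.mem_ofList es k).mp hk
    have hc : 0 < es.count k := List.count_pos_iff.mpr hkes
    simp only [Function.comp]
    rw [hodd _ (by exact_mod_cast hc)]
    constructor <;> intro h <;> simp_all <;> omega
  rw [hcntP, List.countP_eq_length_filter, zero_add]
  -- finally: toggle-list length = number of odd-count distinct edges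
  congr 1
  exact_mod_cast pvLength_eq_of_mem_iff _ _ hnd
    ((PySem.Set.nodup_ofList es).filter _)
    (fun x => by
      rw [show ([] : List (Int × Int × Int × Int)) = (([], (0:Int))).1 from rfl, hmem x, List.mem_filter]
      constructor
      · intro h
        have hx : x ∈ es := by
          have : 0 < es.count x := by omega
          exact List.count_pos_iff.mp this
        exact ⟨(PySem.Set.mem_ofList es x).mpr hx, by simpa using h⟩
      · intro ⟨_, h⟩; simpa using h)
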